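-- pv_equiv track=rewrite | github.com/chaitanya5398/UnbabelImplementations | data_loadLearnEmbeds.py | make_align_dict
-- ===== SOURCE A (Python) =====
-- def make_align_dict(inp,nwords):
--     inplist = inp.split()
--     aldict={}
--     for j in range(nwords):
--         aldict[j] = []
--     for j in inplist:
--         a,b = j.split('-')
--         a,b = int(a),int(b)
--         if b not in aldict:
--             aldict[b] = []
--         aldict[b].append(a)
--     return aldict
-- ===== SOURCE B (Python) =====
-- def make_align_dict(inp, nwords):
--     # Alternative decomposition: parse all tokens up front into (a, b) pairs,
--     # compute the dict's key sequence (range(nwords) then extra keys in first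
--     # appearance order), then build each bucket by a scan over the pairs.
--     pairs = [(int(a), int(b)) for a, b in (t.split('-') for t in inp.split())]
--     keys = list(range(nwords))
--     seen = set(keys)
--     for _, b in pairs:
--         if b not in seen:
--             seen.add(b)
--             keys.append(b)
--     return {k: [a for a, b in pairs if b == k] for k in keys}
-- ===== Notes on version B (the rewrite author's own statement) =====
-- stated objective: alternative
-- what changed: Instead of one stateful pass that creates/extends buckets inside a dict while parsing, B parses every token first, derives the key sequence separately (range(nwords) plus first occurrences of extra keys), and builds each bucket by filtering the parsed pairs in a dict comprehension.
import Mathlib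
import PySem

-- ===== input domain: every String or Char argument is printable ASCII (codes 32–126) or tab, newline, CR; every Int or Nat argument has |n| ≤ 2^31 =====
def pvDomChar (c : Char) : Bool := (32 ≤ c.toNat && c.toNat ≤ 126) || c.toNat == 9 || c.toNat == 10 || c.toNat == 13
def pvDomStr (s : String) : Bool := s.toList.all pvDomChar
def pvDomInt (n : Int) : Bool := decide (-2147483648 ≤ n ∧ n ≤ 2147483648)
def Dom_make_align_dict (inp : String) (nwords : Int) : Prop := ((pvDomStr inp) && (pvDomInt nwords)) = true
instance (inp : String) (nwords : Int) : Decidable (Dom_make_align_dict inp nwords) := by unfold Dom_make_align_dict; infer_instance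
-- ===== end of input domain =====

-- B parses all tokens first, derives the key sequence separately, and builds each
-- bucket by filtering the parsed pairs (alternative decomposition, not faster).

-- ===== PORT A =====
def make_align_dict (inp : String) (nwords : Int) : List (Int × List Int) :=
  let inplist := PySem.Str.split₀ inp
  let aldict : PySem.Dict Int (List Int) :=
    (PySem.List.pyRange 0 nwords).foldl (fun d j => d.insert j []) PySem.Dict.empty
  let final := inplist.foldl (fun d j =>
    match PySem.Str.split? j "-" with
    | some [sa, sb] =>
      match PySem.Int.ofStr? sa, PySem.Int.ofStr? sb with
      | some a, some b =>
        let d := if d.contains b then d else d.insert b []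
        d.modify b [] (fun l => l ++ [a])
      | _, _ => d       -- int() fails: ValueError, outside Pre_
    | _ => d) aldict    -- not exactly two '-'-fields: unpacking ValueError, outside Pre_
  final.items

-- ===== PORT B =====
def make_align_dict_alt (inp : String) (nwords : Int) : List (Int × List Int) :=
  -- on a token Python rejects (ValueError) this parse yields a dummy value: outside Pre_
  let pairs : List (Int × Int) := (PySem.Str.split₀ inp).map (fun t =>
    let ab := (PySem.Str.split? t "-").getD []
    ((PySem.Int.ofStr? (ab.headD "")).getD 0, (PySem.Int.ofStr? (ab.getD 1 "")).getD 0))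
  let keys0 : List Int := PySem.List.pyRange 0 nwords
  let sk := pairs.foldl
    (fun sk p => if PySem.Set.contains sk.1 p.2 then sk
                 else (PySem.Set.add sk.1 p.2, sk.2 ++ [p.2]))
    ((PySem.Set.ofList keys0 : PySem.Set Int), keys0)
  sk.2.map (fun k => (k, (pairs.filter (fun p => p.2 == k)).map Prod.fst))

-- ===== PRECONDITION & SPEC =====
-- token shape test used only by Pre_: exactly one '-' and two int()-parsable halves
def pvTokOK (t : String) : Bool :=
  ((PySem.Str.split? t "-").getD []).length == 2
    && ((PySem.Str.split? t "-").getD []).all (fun s => (PySem.Int.ofStr? s).isSome)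

-- Pre_ excludes exactly the inputs where Python A raises ValueError: a whitespace-
-- separated token without exactly one '-' separator or with a half int() rejects.
def Pre_make_align_dict (inp : String) (nwords : Int) : Prop :=
  ∀ t ∈ PySem.Str.split₀ inp, pvTokOK t = true
instance (inp : String) (nwords : Int) : Decidable (Pre_make_align_dict inp nwords) := by
  unfold Pre_make_align_dict; infer_instance

def pvWitness_make_align_dict : String × Int := ("0-1 2-0 3-1 1-7", 2)

def Spec_make_align_dict (inp : String) (nwords : Int) (out : List (Int × List Int)) : Prop :=
  out = make_align_dict_alt inp nwords
instance (inp : String) (nwords : Int) (out : List (Int × List Int)) : Decidable (Spec_make_align_dict inp nwords out) := by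
  unfold Spec_make_align_dict; infer_instance

-- ===== CLAIM (what is proved, stated in full; the proofs are below) =====
def Claim_equal_make_align_dict : Prop := ∀ (inp : String) (nwords : Int), Dom_make_align_dict inp nwords → Pre_make_align_dict inp nwords → Spec_make_align_dict inp nwords (make_align_dict inp nwords)

-- ===== LEMMAS AND PROOFS =====

-- A's "if missing insert []; then append" step is one modify with default []
lemma pv_stepA (d : PySem.Dict Int (List Int)) (a b : Int) :
    (if d.contains b then d else d.insert b []).modify b [] (· ++ [a])
      = d.modify b [] (· ++ [a]) := by
  by_cases h : d.contains b
  · simp [h]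
  · rw [if_neg (by simp [h])]
    simp only [PySem.Dict.modify, PySem.Dict.getD_insert_self, PySem.Dict.insert_insert_self]
    rw [PySem.Dict.getD_of_not_contains _ _ (by simpa using h)]

-- every value of the range-seeded dict is []
lemma pv_getD_init (l : List Int) (d : PySem.Dict Int (List Int))
    (h : ∀ k, d.getD k [] = []) (k : Int) :
    (l.foldl (fun d j => d.insert j ([] : List Int)) d).getD k [] = [] := by
  induction l generalizing d with
  | nil => exact h k
  | cons x t ih =>
      refine ih _ (fun k' => ?_)
      rw [PySem.Dict.getD_insert]
      split <;> simp [h]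

-- B's (seen, keys) loop: starting from equal components it is Set.update on keys
lemma pv_keysB (l : List (Int × Int)) (k : PySem.Set Int) :
    (l.foldl
      (fun sk p => if PySem.Set.contains sk.1 p.2 then sk
                   else (PySem.Set.add sk.1 p.2, sk.2 ++ [p.2])) (k, k)).2
      = PySem.Set.update k (l.map (·.2)) := by
  induction l generalizing k with
  | nil => simp [PySem.Set.update]
  | cons p t ih =>
      simp only [List.map_cons, List.foldl_cons]
      have hstep : (if PySem.Set.contains k p.2 then ((k, k) : PySem.Set Int × List Int)
          else (PySem.Set.add k p.2, k ++ [p.2]))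
          = (PySem.Set.add k p.2, PySem.Set.add k p.2) := by
        by_cases h : PySem.Set.contains k p.2
        · rw [if_pos h]; simp only [PySem.Set.add, if_pos h]
        · rw [if_neg h]; simp only [PySem.Set.add, if_neg h]
      rw [hstep]
      have hupd : PySem.Set.update k (p.2 :: t.map (·.2))
          = PySem.Set.update (PySem.Set.add k p.2) (t.map (·.2)) := rfl
      rw [hupd]
      exact ih _

-- ===== VERDICT (by name: the statement is the Claim_ definition above) =====
theorem make_align_dict_spec : Claim_equal_make_align_dict := by
  intro inp nwords _hdom hpre
  unfold Spec_make_align_dict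
  simp only [make_align_dict, make_align_dict_alt]
  set tokens := PySem.Str.split₀ inp with htoks
  set parse : String → Int × Int := fun t =>
    let ab := (PySem.Str.split? t "-").getD []
    ((PySem.Int.ofStr? (ab.headD "")).getD 0, (PySem.Int.ofStr? (ab.getD 1 "")).getD 0)
    with hparse
  set pairs : List (Int × Int) := tokens.map parse with hpairs
  set keys0 : List Int := PySem.List.pyRange 0 nwords with hkeys0
  set d0 : PySem.Dict Int (List Int) :=
    keys0.foldl (fun d j => d.insert j []) PySem.Dict.empty with hd0
  -- A's token loop is the pair-modify loop
  have hA : tokens.foldl (fun d j =>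
      match PySem.Str.split? j "-" with
      | some [sa, sb] =>
        match PySem.Int.ofStr? sa, PySem.Int.ofStr? sb with
        | some a, some b =>
          let d' := if d.contains b then d else d.insert b []
          d'.modify b [] (fun l => l ++ [a])
        | _, _ => d
      | _ => d) d0
      = pairs.foldl (fun d p => d.modify p.2 [] (fun l => l ++ [p.1])) d0 := by
    rw [hpairs, List.foldl_map]
    refine PySem.List.foldl_congr_mem _ _ _ _ (fun d t ht => ?_)
    have h := hpre t ht
    unfold pvTokOK at h
    rw [Bool.and_eq_true, beq_iff_eq] at h
    obtain ⟨hlen, hall⟩ := h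
    rw [hparse]
    cases hsp : PySem.Str.split? t "-" with
    | none => rw [hsp] at hlen; simp at hlen
    | some parts =>
        rw [hsp] at hlen hall
        simp only [Option.getD_some] at hlen hall
        match parts, hlen with
        | [sa, sb], _ =>
            rw [List.all_cons, List.all_cons, Bool.and_eq_true, Bool.and_eq_true] at hall
            obtain ⟨hsa, hsb, -⟩ := hall
            obtain ⟨a, ha⟩ := Option.isSome_iff_exists.mp hsa
            obtain ⟨b, hb⟩ := Option.isSome_iff_exists.mp hsb
            simp only [hsp, ha, hb, Option.getD_some, List.headD_cons,
              List.getD_cons_succ, List.getD_cons_zero]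
            exact pv_stepA d a b
  rw [hA]
  -- final dict of A
  set final := pairs.foldl (fun d p => d.modify p.2 [] (fun l => l ++ [p.1])) d0 with hfinal
  have hnd0 : d0.keys.Nodup := by
    rw [hd0]
    exact PySem.Dict.nodup_keys_foldl_insert _ _ _ (by simp)
  have hndf : final.keys.Nodup :=
    PySem.Dict.nodup_keys_foldl_modify_key pairs (·.2) [] (fun _ p => (· ++ [p.1])) d0 hnd0
  have hkd0 : d0.keys = keys0 := by
    rw [hd0, PySem.Dict.keys_foldl_insert (f := fun _ _ => ([] : List Int))]
    rw [PySem.Dict.keys_empty]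
    show List.foldl PySem.Set.add [] keys0 = keys0
    rw [← PySem.Set.ofList_eq_foldl]
    exact PySem.Set.ofList_eq_self_of_nodup _ (PySem.List.nodup_pyRange_one 0 nwords)
  have hkeysf : final.keys = PySem.Set.update keys0 (pairs.map (·.2)) := by
    rw [hfinal, PySem.Dict.keys_foldl_modify_key pairs (·.2) [] (fun _ p => (· ++ [p.1])) d0, hkd0]
  have hgetD : ∀ c : Int, final.getD c [] = (pairs.filter (fun p => p.2 == c)).map Prod.fst := by
    intro c
    have hswap : (pairs.map Prod.swap).foldl
        (fun d q => d.modify q.1 [] (fun l => l ++ [q.2])) d0 = final := by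
      rw [List.foldl_map (f := Prod.swap), hfinal]
      rfl
    have hg0 : d0.getD c [] = [] := by
      rw [hd0]; exact pv_getD_init keys0 PySem.Dict.empty (fun k => by simp) c
    rw [← hswap, PySem.Dict.getD_foldl_modify_append, hg0]
    simp [List.filter_map, Function.comp_def, Prod.swap]
  -- B's key list
  have hB : (pairs.foldl
      (fun sk p => if PySem.Set.contains sk.1 p.2 then sk
                   else (PySem.Set.add sk.1 p.2, sk.2 ++ [p.2]))
      ((PySem.Set.ofList keys0 : PySem.Set Int), keys0)).2
      = PySem.Set.update keys0 (pairs.map (·.2)) := by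
    rw [PySem.Set.ofList_eq_self_of_nodup _ (PySem.List.nodup_pyRange_one 0 nwords)]
    exact pv_keysB pairs keys0
  rw [PySem.Dict.items_eq_map_keys final hndf [], hkeysf, hB]
  exact List.map_congr_left (fun k _ => by rw [hgetD k])
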